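-- pv_equiv track=rewrite | github.com/Stelh/NaliosDevTest | 02_game_of_life.py | check_border
-- ===== SOURCE A (Python) =====
-- def check_border(next_step):
--     for i, r in enumerate(next_step[0]):
--         if r == 1:
--             return True
--     for i, r in enumerate(next_step[-1]):
--         if r == 1:
--             return True
--     for i in range(len(next_step)):
--         if next_step[i][0] == 1:
--             return True
--     for i in range(len(next_step)):
--         if next_step[i][-1] == 1:
--             return True
--     return False
-- ===== SOURCE B (Python) =====
-- def check_border(next_step):
--     n = len(next_step)
--     for i, row in enumerate(next_step):
--         m = len(row)
--         for j, cell in enumerate(row):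
--             if cell == 1 and (i == 0 or i == n - 1 or j == 0 or j == m - 1):
--                 return True
--     return False
-- ===== Notes on version B (the rewrite author's own statement) =====
-- stated objective: alternative
-- what changed: A makes four separate perimeter passes (top row, bottom row, then two column scans); B makes one nested scan over every cell of the grid and tests the cell value together with a border predicate on its indices (i==0 or i==n-1 or j==0 or j==m-1).
import Mathlib
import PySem

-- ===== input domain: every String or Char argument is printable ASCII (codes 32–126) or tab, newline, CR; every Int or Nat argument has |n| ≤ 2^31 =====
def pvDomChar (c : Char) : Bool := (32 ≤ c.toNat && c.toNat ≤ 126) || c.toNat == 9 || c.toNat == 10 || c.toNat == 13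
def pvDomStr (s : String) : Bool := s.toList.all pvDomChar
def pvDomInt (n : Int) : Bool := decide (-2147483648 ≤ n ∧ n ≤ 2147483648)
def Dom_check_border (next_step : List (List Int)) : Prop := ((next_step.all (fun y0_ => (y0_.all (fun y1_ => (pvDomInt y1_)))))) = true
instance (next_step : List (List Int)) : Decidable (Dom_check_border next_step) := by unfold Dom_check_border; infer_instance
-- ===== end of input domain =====

-- B replaces A's four perimeter passes by one full-grid scan over all cells with a
-- "cell is on the border" index predicate (objective: alternative decomposition).

-- ===== PORT A =====
-- Four sequential early-return loops, as in the Python; next_step[0] / next_step[-1] via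
-- pyGet? (none = IndexError on the empty grid, outside Pre_); next_step[i][0] / [-1] via
-- pyGet? with .getD 0 — the default stands for the IndexError Python raises on an empty
-- row, which Pre_ excludes from the claim.
def check_border (next_step : List (List Int)) : Bool :=
  match PySem.List.pyGet? next_step 0, PySem.List.pyGet? next_step (-1) with
  | some row0, some rowL =>
    if row0.any (fun r => r == 1) then true
    else if rowL.any (fun r => r == 1) then true
    else if next_step.any (fun row => (PySem.List.pyGet? row 0).getD 0 == 1) then true
    else next_step.any (fun row => (PySem.List.pyGet? row (-1)).getD 0 == 1)
  | _, _ => false  -- Python: IndexError on the empty grid (outside Pre_)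

-- ===== PORT B =====
-- One doubly-indexed scan over all cells, testing cell == 1 together with the border
-- predicate on the indices, exactly as Source B's nested enumerate loops.
def check_border_alt (next_step : List (List Int)) : Bool :=
  let n : Int := next_step.length
  (PySem.List.enumerate next_step).any (fun p =>
    let m : Int := p.2.length
    (PySem.List.enumerate p.2).any (fun q =>
      q.2 == 1 && (p.1 == 0 || p.1 == n - 1 || q.1 == 0 || q.1 == m - 1)))

-- ===== PRECONDITION & SPEC =====
-- Pre_ excludes exactly the inputs on which Python A raises IndexError: the empty grid, and
-- grids containing an empty row on which no 1 is found (in the first row, the last row, or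
-- at the head of a row before the first empty row) before the faulty index access.
def Pre_check_border (next_step : List (List Int)) : Prop :=
  next_step ≠ [] ∧
    ([] ∉ next_step ∨ (1 : Int) ∈ next_step.headI ∨ (1 : Int) ∈ (next_step.getLast?.getD []) ∨
      (next_step.takeWhile (fun row => !row.isEmpty)).any (fun row => row.head? == some (1 : Int)) = true)
instance (next_step : List (List Int)) : Decidable (Pre_check_border next_step) := by
  unfold Pre_check_border; infer_instance

def pvWitness_check_border : List (List Int) := [[0, 1], [0, 0]]

def Spec_check_border (next_step : List (List Int)) (out : Bool) : Prop := out = check_border_alt next_step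
instance (next_step : List (List Int)) (out : Bool) : Decidable (Spec_check_border next_step out) := by unfold Spec_check_border; infer_instance

-- ===== CLAIM (what is proved, stated in full; the proofs are below) =====
def Claim_equal_check_border : Prop := ∀ (next_step : List (List Int)), Dom_check_border next_step → Pre_check_border next_step → Spec_check_border next_step (check_border next_step)

-- ===== LEMMAS AND PROOFS =====

-- B's value, characterised: some cell equals 1 and its indices lie on the border.
lemma alt_char (ns : List (List Int)) :
    check_border_alt ns = true ↔
      ∃ (k : Nat) (_ : k < ns.length) (j : Nat) (_ : j < ns[k].length),
        ns[k][j] = 1 ∧ (k = 0 ∨ k = ns.length - 1 ∨ j = 0 ∨ j = ns[k].length - 1) := by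
  unfold check_border_alt
  simp only [List.any_eq_true, PySem.List.mem_enumerate_iff, zero_add]
  constructor
  · rintro ⟨p, ⟨k, hk, rfl⟩, q, hq, hcond⟩
    obtain ⟨j, hj, hqe⟩ := hq
    rw [hqe] at hcond
    dsimp only at hj hcond
    simp only [Bool.and_eq_true, Bool.or_eq_true, beq_iff_eq] at hcond
    obtain ⟨h1, hb⟩ := hcond
    exact ⟨k, hk, j, hj, h1, by omega⟩
  · rintro ⟨k, hk, j, hj, h1, hb⟩
    refine ⟨((k : Int), ns[k]), ⟨k, hk, rfl⟩, ((j : Int), ns[k][j]), ⟨j, hj, rfl⟩, ?_⟩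
    dsimp only
    simp only [Bool.and_eq_true, Bool.or_eq_true, beq_iff_eq]
    exact ⟨h1, by omega⟩

-- A's value, characterised (for a nonempty grid): a 1 in the first row, the last row,
-- at the head of some row, or at the end of some row.
lemma a_char (ns : List (List Int)) (h : ns ≠ []) :
    check_border ns =
      ((ns.head h).any (fun r => r == 1) || (ns.getLast h).any (fun r => r == 1) ||
        ns.any (fun row => row.head? == some 1) || ns.any (fun row => row.getLast? == some 1)) := by
  unfold check_border
  have hn : 0 < ns.length := List.length_pos_iff.mpr h
  have h0 : PySem.List.pyGet? ns 0 = some (ns.head h) := by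
    rw [PySem.List.pyGet?_zero, List.getElem?_eq_getElem hn, List.head_eq_getElem]
  have hL : PySem.List.pyGet? ns (-1) = some (ns.getLast h) := by
    rw [PySem.List.pyGet?_neg_one, List.getLast?_eq_some_getLast h]
  rw [h0, hL]
  have hrow : ∀ row : List Int,
      ((PySem.List.pyGet? row 0).getD 0 == 1) = (row.head? == some 1) := by
    intro row; cases row <;> simp [PySem.List.pyGet?_zero]
  have hrowL : ∀ row : List Int,
      ((PySem.List.pyGet? row (-1)).getD 0 == 1) = (row.getLast? == some 1) := by
    intro row
    rw [PySem.List.pyGet?_neg_one]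
    cases row.getLast? <;> simp
  simp only [hrow, hrowL]
  cases hA : (ns.head h).any (fun r => r == 1) <;>
    cases hB : (ns.getLast h).any (fun r => r == 1) <;>
      cases hC : ns.any (fun row => row.head? == some 1) <;>
        cases hD : ns.any (fun row => row.getLast? == some 1) <;>
          simp_all

-- The two ports agree on every input (Pre_ only marks where the Pythons return normally).
lemma ports_agree (ns : List (List Int)) :
    check_border ns = check_border_alt ns := by
  rcases eq_or_ne ns [] with rfl | h
  · rfl
  · have hn : 0 < ns.length := List.length_pos_iff.mpr h
    rw [a_char ns h, Bool.eq_iff_iff, alt_char ns]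
    simp only [Bool.or_eq_true, List.any_eq_true, beq_iff_eq]
    constructor
    · rintro (((h1 | h1) | ⟨row, hrow, hhd⟩) | ⟨row, hrow, hlast⟩)
      · obtain ⟨r, hr, rfl⟩ := h1
        rw [List.head_eq_getElem] at hr
        obtain ⟨j, hj, hx⟩ := List.mem_iff_getElem.mp hr
        exact ⟨0, hn, j, hj, hx, Or.inl rfl⟩
      · obtain ⟨r, hr, rfl⟩ := h1
        rw [List.getLast_eq_getElem] at hr
        obtain ⟨j, hj, hx⟩ := List.mem_iff_getElem.mp hr
        exact ⟨ns.length - 1, by omega, j, hj, hx, Or.inr (Or.inl rfl)⟩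
      · obtain ⟨k, hk, rfl⟩ := List.mem_iff_getElem.mp hrow
        have hne : ns[k] ≠ [] := by intro he; rw [he] at hhd; simp at hhd
        have hlen : 0 < ns[k].length := List.length_pos_iff.mpr hne
        rw [List.head?_eq_some_head hne, Option.some.injEq, List.head_eq_getElem] at hhd
        exact ⟨k, hk, 0, hlen, hhd, Or.inr (Or.inr (Or.inl rfl))⟩
      · obtain ⟨k, hk, rfl⟩ := List.mem_iff_getElem.mp hrow
        have hne : ns[k] ≠ [] := by intro he; rw [he] at hlast; simp at hlast
        have hlen : 0 < ns[k].length := List.length_pos_iff.mpr hne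
        rw [List.getLast?_eq_some_getLast hne, Option.some.injEq, List.getLast_eq_getElem] at hlast
        exact ⟨k, hk, ns[k].length - 1, by omega, hlast, Or.inr (Or.inr (Or.inr rfl))⟩
    · rintro ⟨k, hk, j, hj, hx, rfl | hb | rfl | hb⟩
      · exact Or.inl (Or.inl (Or.inl ⟨ns[0][j], by
          rw [List.head_eq_getElem]; exact List.getElem_mem hj, hx⟩))
      · subst hb
        exact Or.inl (Or.inl (Or.inr ⟨ns[ns.length - 1][j], by
          rw [List.getLast_eq_getElem]; exact List.getElem_mem hj, hx⟩))
      · refine Or.inl (Or.inr ⟨ns[k], List.getElem_mem hk, ?_⟩)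
        have hne : ns[k] ≠ [] := by intro he; rw [he] at hj; simp at hj
        rw [List.head?_eq_some_head hne, Option.some.injEq, List.head_eq_getElem]
        exact hx
      · subst hb
        refine Or.inr ⟨ns[k], List.getElem_mem hk, ?_⟩
        have hne : ns[k] ≠ [] := by intro he; rw [he] at hj; simp at hj
        rw [List.getLast?_eq_some_getLast hne, Option.some.injEq, List.getLast_eq_getElem]
        exact hx

-- ===== VERDICT (by name: the statements are the Claim_ definitions above) =====
theorem check_border_spec : Claim_equal_check_border := by
  intro ns _ _
  exact ports_agree ns
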